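-- pv_equiv track=rewrite | github.com/heyitskevin/adventofcode | 2024/day_05/2.py | getmid
-- ===== SOURCE A (Python) =====
-- def getmid(rules, pages):
--     ls = {}
--     rs = {}
--     # for every element in the list
--     # get all its lefts and rights
--     # find all the lefts and rights in the list
--     # midpoint is when they're equal length
--     # don't even need to order the array
--     for elem in pages:
--         l, r = [], []
--         for left, right in rules:
--             if elem == left and right in pages:
--                 r.append(right)
--             elif elem == right and left in pages:
--                 l.append(left)
--         ls[elem] = l
--         rs[elem] = r
--
--     for elem in pages:
--         if len(ls[elem]) == len(rs[elem]):
--             assert not len(set(ls[elem]).intersection(set(rs[elem])))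
--             return elem
--
--     return -1
-- ===== SOURCE B (Python) =====
-- def getmid(rules, pages):
--     ps = set(pages)
--     lc = {}
--     rc = {}
--     for left, right in rules:
--         if left in ps and right in ps:
--             rc[left] = rc.get(left, 0) + 1
--             lc[right] = lc.get(right, 0) + 1
--     for elem in pages:
--         if lc.get(elem, 0) == rc.get(elem, 0):
--             return elem
--     return -1
-- ===== Notes on version B (the rewrite author's own statement) =====
-- stated objective: faster
-- what changed: Instead of scanning all rules once per page element (collecting explicit left/right lists per element), B indexes the rules once into two counters keyed by element (using a set for page membership) and then scans pages for the first element with equal counts.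
-- outside the precondition, e.g. on getmid([(5, 5)], [5]): A returns -1, B returns 5
import Mathlib
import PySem

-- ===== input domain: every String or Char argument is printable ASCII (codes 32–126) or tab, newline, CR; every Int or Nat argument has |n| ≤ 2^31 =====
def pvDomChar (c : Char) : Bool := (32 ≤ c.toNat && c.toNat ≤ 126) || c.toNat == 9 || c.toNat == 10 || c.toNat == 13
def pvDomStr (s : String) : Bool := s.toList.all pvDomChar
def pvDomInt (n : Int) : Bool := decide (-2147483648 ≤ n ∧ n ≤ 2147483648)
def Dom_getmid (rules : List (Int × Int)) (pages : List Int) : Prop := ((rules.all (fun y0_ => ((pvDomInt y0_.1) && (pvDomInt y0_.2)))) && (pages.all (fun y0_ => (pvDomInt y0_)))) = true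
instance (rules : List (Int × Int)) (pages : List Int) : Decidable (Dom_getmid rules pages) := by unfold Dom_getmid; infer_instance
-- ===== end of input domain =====

-- B replaces A's per-page scan over all rules by a single counting pass over the rules
-- (counters keyed by element, set membership for pages): an asymptotically faster exact re-implementation.


-- ===== PORT A =====
-- Literal port of A.  The 'assert' in A's second loop raises exactly on the inputs excluded
-- by Pre_getmid's second conjunct; when it passes it does not affect the value, so the port
-- returns the element directly.
def getmid (rules : List (Int × Int)) (pages : List Int) : Int :=
  let dicts : PySem.Dict Int (List Int) × PySem.Dict Int (List Int) :=
    pages.foldl (fun d elem =>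
      let lr : List Int × List Int :=
        rules.foldl (fun lr p =>
          if elem == p.1 && pages.contains p.2 then (lr.1, lr.2 ++ [p.2])
          else if elem == p.2 && pages.contains p.1 then (lr.1 ++ [p.1], lr.2)
          else lr) ([], [])
      (d.1.insert elem lr.1, d.2.insert elem lr.2)) (PySem.Dict.empty, PySem.Dict.empty)
  match pages.find? (fun e => (dicts.1.getD e []).length == (dicts.2.getD e []).length) with
  | some e => e
  | none => -1

-- ===== PORT B =====
def getmid_alt (rules : List (Int × Int)) (pages : List Int) : Int :=
  let ps : PySem.Set Int := PySem.Set.ofList pages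
  let cnts : PySem.Dict Int Int × PySem.Dict Int Int :=
    rules.foldl (fun d p =>
      if ps.contains p.1 && ps.contains p.2 then
        (d.1.insert p.2 (d.1.getD p.2 0 + 1), d.2.insert p.1 (d.2.getD p.1 0 + 1))
      else d) (PySem.Dict.empty, PySem.Dict.empty)
  match pages.find? (fun e => cnts.1.getD e 0 == cnts.2.getD e 0) with
  | some e => e
  | none => -1

-- ===== PRECONDITION & SPEC =====
-- A's per-element lists, with A's exact if/elif semantics ('lefts' excludes a rule already
-- taken by the first branch).
def leftsA (rules : List (Int × Int)) (pages : List Int) (e : Int) : List Int :=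
  (rules.filter (fun p => !(e == p.1 && pages.contains p.2) && (e == p.2 && pages.contains p.1))).map (·.1)
def rightsA (rules : List (Int × Int)) (pages : List Int) (e : Int) : List Int :=
  (rules.filter (fun p => e == p.1 && pages.contains p.2)).map (·.2)
-- the first element of pages whose left- and right-lists have equal length (A's second loop)
def firstBal (rules : List (Int × Int)) (pages : List Int) : Option Int :=
  pages.find? (fun e => (leftsA rules pages e).length == (rightsA rules pages e).length)
-- true exactly when A's assert would fail (AssertionError)
def pvBad (rules : List (Int × Int)) (pages : List Int) : Bool :=
  (firstBal rules pages).any (fun e => (leftsA rules pages e).any (fun x => (rightsA rules pages e).contains x))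

-- Pre_ excludes (a) self-rules (x, x) whose page x occurs in pages — a contradictory ordering rule,
-- which A's elif accidentally counts as a right-rule only while B counts it on both sides — and
-- (b) the inputs on which A's assert raises AssertionError.
def Pre_getmid (rules : List (Int × Int)) (pages : List Int) : Prop :=
  rules.all (fun p => !(p.1 == p.2 && pages.contains p.1)) = true ∧ pvBad rules pages = false
instance (rules : List (Int × Int)) (pages : List Int) : Decidable (Pre_getmid rules pages) := by unfold Pre_getmid; infer_instance
def pvWitness_getmid : (List (Int × Int)) × List Int := ([(1, 2)], [1, 2, 3])

def Spec_getmid (rules : List (Int × Int)) (pages : List Int) (out : Int) : Prop := out = getmid_alt rules pages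
instance (rules : List (Int × Int)) (pages : List Int) (out : Int) : Decidable (Spec_getmid rules pages out) := by unfold Spec_getmid; infer_instance

-- ===== CLAIM (what is proved, stated in full; the proofs are below) =====
def Claim_equal_getmid : Prop := ∀ (rules : List (Int × Int)) (pages : List Int), Dom_getmid rules pages → Pre_getmid rules pages → Spec_getmid rules pages (getmid rules pages)

-- ===== LEMMAS AND PROOFS =====

-- A's inner loop over the rules produces exactly (leftsA, rightsA)
theorem innerA_eq (rules : List (Int × Int)) (pages : List Int) (e : Int) (a b : List Int) :
    rules.foldl (fun lr p =>
      if e == p.1 && pages.contains p.2 then (lr.1, lr.2 ++ [p.2])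
      else if e == p.2 && pages.contains p.1 then (lr.1 ++ [p.1], lr.2)
      else lr) (a, b) = (a ++ leftsA rules pages e, b ++ rightsA rules pages e) := by
  induction rules generalizing a b with
  | nil => simp [leftsA, rightsA]
  | cons p t ih =>
    simp only [List.foldl_cons]
    by_cases h1 : (e == p.1 && pages.contains p.2) = true
    · rw [if_pos h1, ih]
      simp only [leftsA, rightsA, List.filter_cons]
      split_ifs <;> simp_all
    · by_cases h2 : (e == p.2 && pages.contains p.1) = true
      · rw [if_neg h1, if_pos h2, ih]
        simp only [leftsA, rightsA, List.filter_cons]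
        split_ifs <;> simp_all
      · rw [if_neg h1, if_neg h2, ih]
        simp only [leftsA, rightsA, List.filter_cons]
        split_ifs <;> simp_all

-- a dict filled by inserting a key-determined value for every element of l
theorem dictFill_getD (l : List Int) (F : Int → List Int) (d : PySem.Dict Int (List Int)) (e : Int) :
    (l.foldl (fun d x => d.insert x (F x)) d).getD e [] =
      if e ∈ l then F e else d.getD e [] := by
  induction l generalizing d with
  | nil => simp
  | cons x t ih =>
    simp only [List.foldl_cons, ih, PySem.Dict.getD_insert, List.mem_cons]
    by_cases ht : e ∈ t <;> by_cases hx : e = x <;> simp [ht, hx]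

theorem counterFill_getD_snd (l : List (Int × Int)) (c : Int × Int → Bool)
    (d : PySem.Dict Int Int) (e : Int) :
    (l.foldl (fun d p => if c p then d.insert p.2 (d.getD p.2 0 + 1) else d) d).getD e 0 =
      d.getD e 0 + (((l.filter c).map (fun p => p.2)).count e : Int) := by
  rw [PySem.List.foldl_if_eq_foldl_filter]
  have h : ((l.filter c).map (fun p => p.2)).foldl (fun d x => d.insert x (d.getD x 0 + 1)) d
      = (l.filter c).foldl (fun d p => d.insert p.2 (d.getD p.2 0 + 1)) d := by
    rw [List.foldl_map]
  rw [← h, PySem.Dict.getD_foldl_insert_add_one]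

theorem counterFill_getD_fst (l : List (Int × Int)) (c : Int × Int → Bool)
    (d : PySem.Dict Int Int) (e : Int) :
    (l.foldl (fun d p => if c p then d.insert p.1 (d.getD p.1 0 + 1) else d) d).getD e 0 =
      d.getD e 0 + (((l.filter c).map (fun p => p.1)).count e : Int) := by
  rw [PySem.List.foldl_if_eq_foldl_filter]
  have h : ((l.filter c).map (fun p => p.1)).foldl (fun d x => d.insert x (d.getD x 0 + 1)) d
      = (l.filter c).foldl (fun d p => d.insert p.1 (d.getD p.1 0 + 1)) d := by
    rw [List.foldl_map]
  rw [← h, PySem.Dict.getD_foldl_insert_add_one]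

theorem find?_congr_mem {α : Type} (l : List α) (p q : α → Bool)
    (h : ∀ x ∈ l, p x = q x) : l.find? p = l.find? q := by
  induction l with
  | nil => rfl
  | cons x t ih =>
    simp only [List.find?_cons, h x (by simp)]
    cases q x
    · exact ih (fun y hy => h y (by simp [hy]))
    · rfl

theorem getmid_spec : Claim_equal_getmid := by
  intro rules pages _ hpre
  obtain ⟨hns, _⟩ := hpre
  have hp : ∀ p ∈ rules, ¬(p.1 = p.2 ∧ p.1 ∈ pages) := by
    intro p hpm
    have h := (by simpa using hns : ∀ (a b : ℤ), (a, b) ∈ rules → ¬a = b ∨ a ∉ pages) p.1 p.2 hpm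
    tauto
  have hset : ∀ x : Int, (PySem.Set.ofList pages).contains x = pages.contains x := by
    intro x
    simp [PySem.Set.mem_ofList]
  simp only [Spec_getmid, getmid, getmid_alt, innerA_eq, List.nil_append]
  rw [PySem.List.foldl_prod_mk
        (f := fun (d : PySem.Dict Int (List Int)) elem => d.insert elem (leftsA rules pages elem))
        (g := fun (d : PySem.Dict Int (List Int)) elem => d.insert elem (rightsA rules pages elem))]
  have hstep : (fun (d : PySem.Dict Int Int × PySem.Dict Int Int) (p : Int × Int) =>
      if (PySem.Set.ofList pages).contains p.1 && (PySem.Set.ofList pages).contains p.2 then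
        (d.1.insert p.2 (d.1.getD p.2 0 + 1), d.2.insert p.1 (d.2.getD p.1 0 + 1))
      else d)
      = fun d p =>
        ((if (PySem.Set.ofList pages).contains p.1 && (PySem.Set.ofList pages).contains p.2 then
            d.1.insert p.2 (d.1.getD p.2 0 + 1) else d.1),
         (if (PySem.Set.ofList pages).contains p.1 && (PySem.Set.ofList pages).contains p.2 then
            d.2.insert p.1 (d.2.getD p.1 0 + 1) else d.2)) := by
    funext d p
    split <;> rfl
  rw [hstep]
  rw [PySem.List.foldl_prod_mk
        (f := fun (d : PySem.Dict Int Int) (p : Int × Int) =>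
          if (PySem.Set.ofList pages).contains p.1 && (PySem.Set.ofList pages).contains p.2 then
            d.insert p.2 (d.getD p.2 0 + 1) else d)
        (g := fun (d : PySem.Dict Int Int) (p : Int × Int) =>
          if (PySem.Set.ofList pages).contains p.1 && (PySem.Set.ofList pages).contains p.2 then
            d.insert p.1 (d.getD p.1 0 + 1) else d)]
  have hfind :
      pages.find? (fun e =>
        ((pages.foldl (fun d x => d.insert x (leftsA rules pages x)) PySem.Dict.empty).getD e []).length ==
        ((pages.foldl (fun d x => d.insert x (rightsA rules pages x)) PySem.Dict.empty).getD e []).length)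
      = pages.find? (fun e =>
        ((rules.foldl (fun d p =>
            if (PySem.Set.ofList pages).contains p.1 && (PySem.Set.ofList pages).contains p.2 then
              d.insert p.2 (d.getD p.2 0 + 1) else d) (PySem.Dict.empty : PySem.Dict Int Int)).getD e 0) ==
        ((rules.foldl (fun d p =>
            if (PySem.Set.ofList pages).contains p.1 && (PySem.Set.ofList pages).contains p.2 then
              d.insert p.1 (d.getD p.1 0 + 1) else d) (PySem.Dict.empty : PySem.Dict Int Int)).getD e 0)) := by
    apply find?_congr_mem
    intro e he
    have hcont : pages.contains e = true := by simpa [List.contains_iff_mem] using he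
    rw [dictFill_getD, dictFill_getD]
    rw [counterFill_getD_snd rules (fun p => (PySem.Set.ofList pages).contains p.1 && (PySem.Set.ofList pages).contains p.2) PySem.Dict.empty e,
        counterFill_getD_fst rules (fun p => (PySem.Set.ofList pages).contains p.1 && (PySem.Set.ofList pages).contains p.2) PySem.Dict.empty e]
    simp only [if_pos he, PySem.Dict.getD_empty, zero_add]
    -- reduce both sides to the same filtered lengths
    have hl : leftsA rules pages e = (rules.filter (fun p => e == p.2 && pages.contains p.1)).map (·.1) := by
      unfold leftsA
      congr 1
      apply List.filter_congr
      intro p hpmem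
      by_cases h2 : e = p.2
      · by_cases hmem1 : p.1 ∈ pages
        · have : ¬ e = p.1 := by
            intro h1
            exact hp p hpmem ⟨h1.symm.trans h2, h1 ▸ he⟩
          simp [h2, hmem1]
          exact Or.inl (by rw [← h2]; exact this)
        · simp [hmem1]
      · simp [h2]
    have hcl : ((rules.filter (fun p => (PySem.Set.ofList pages).contains p.1 && (PySem.Set.ofList pages).contains p.2)).map (fun p => p.2)).count e
        = (rules.filter (fun p => e == p.2 && pages.contains p.1)).length := by
      rw [List.count_eq_countP, List.countP_map, List.countP_filter, ← List.countP_eq_length_filter]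
      apply List.countP_congr
      intro p hpmem
      simp only [Function.comp_apply, hset]
      by_cases h2 : p.2 = e
      · simp [h2, he]
      · simp [h2, Ne.symm h2]
    have hcr : ((rules.filter (fun p => (PySem.Set.ofList pages).contains p.1 && (PySem.Set.ofList pages).contains p.2)).map (fun p => p.1)).count e
        = (rules.filter (fun p => e == p.1 && pages.contains p.2)).length := by
      rw [List.count_eq_countP, List.countP_map, List.countP_filter, ← List.countP_eq_length_filter]
      apply List.countP_congr
      intro p hpmem
      simp only [Function.comp_apply, hset]
      by_cases h1 : p.1 = e
      · simp [h1, he]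
      · simp [h1, Ne.symm h1]
    rw [hl, hcl, hcr]
    simp [rightsA]
  rw [hfind]
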